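-- pv_equiv track=rewrite | github.com/kandreyrosales/credity | main_problem_credity.py | process
-- ===== SOURCE A (Python) =====
-- def process(raw_list):
--     '''
--     This is the main function that return the result of Pascal triangle
--     raw_list[1:] getting the items of right side
--     :param raw_list:
--     :return: int
--     '''
--     base = 7
--     if not raw_list:
--         return 0
--     columns = raw_list[0]
--     if not columns:
--         return process(raw_list[1:])
--     if columns < base:
--         columns*(1+columns) // 2
--     y = base * (1+base) // 2
--     # main calculation of function
--     step1 = columns*(columns+1) // 2
--     step2 = step1 * y ** (len(raw_list)-1)
--     step3 = step2 + (columns+1) * process(raw_list[1:])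
--     return step3
-- ===== SOURCE B (Python) =====
-- def process(raw_list):
--     # One O(n) pass from the tail: running accumulator plus incremental power of y=28 (no slicing, no recursion).
--     acc = 0
--     p = 1
--     for c in reversed(raw_list):
--         if c:
--             acc = c * (c + 1) // 2 * p + (c + 1) * acc
--         p *= 28
--     return acc
-- ===== Notes on version B (the rewrite author's own statement) =====
-- stated objective: faster
-- what changed: Replaced the recursion with per-call list slicing and a fresh y**(len-1) power computation by a single reverse iteration keeping a running accumulator and an incrementally updated power of 28.
import Mathlib
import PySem

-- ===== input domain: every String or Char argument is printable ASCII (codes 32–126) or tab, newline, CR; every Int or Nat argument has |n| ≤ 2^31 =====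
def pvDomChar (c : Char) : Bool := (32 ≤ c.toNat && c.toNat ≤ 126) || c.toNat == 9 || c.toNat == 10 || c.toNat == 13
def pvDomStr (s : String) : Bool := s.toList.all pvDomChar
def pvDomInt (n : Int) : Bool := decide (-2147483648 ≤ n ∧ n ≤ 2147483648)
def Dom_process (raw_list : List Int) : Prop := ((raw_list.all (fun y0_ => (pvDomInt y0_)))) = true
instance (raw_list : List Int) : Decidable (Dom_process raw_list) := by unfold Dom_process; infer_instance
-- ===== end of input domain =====

-- ===== PORT A =====
-- Literal port of A: recursion on the list; raw_list[1:] is the tail; the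
-- no-effect line `columns*(1+columns) // 2` in A is dropped (it computes nothing).
def process : List Int → Int
  | [] => 0
  | columns :: rest =>
    if columns == 0 then process rest
    else
      let y : Int := PySem.Int.floordiv (7 * (1 + 7)) 2
      let step1 : Int := PySem.Int.floordiv (columns * (columns + 1)) 2
      let step2 : Int := step1 * y ^ rest.length
      step2 + (columns + 1) * process rest

-- ===== PORT B =====
-- Port of B: fold over the reversed list with state (acc, p).
def process_alt (raw_list : List Int) : Int :=
  (raw_list.reverse.foldl
    (fun (s : Int × Int) c =>
      (if c ≠ 0 then PySem.Int.floordiv (c * (c + 1)) 2 * s.2 + (c + 1) * s.1 else s.1,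
       s.2 * 28)) ((0 : Int), (1 : Int))).1

-- ===== PRECONDITION & SPEC =====
def Spec_process (raw_list : List Int) (out : Int) : Prop := out = process_alt raw_list
instance (raw_list : List Int) (out : Int) : Decidable (Spec_process raw_list out) := by unfold Spec_process; infer_instance

-- ===== CLAIM (what is proved, stated in full; the proofs are below) =====
def Claim_equal_process : Prop := ∀ (raw_list : List Int), Dom_process raw_list → Spec_process raw_list (process raw_list)

-- ===== LEMMAS AND PROOFS =====

-- ===== VERDICT (by name: the statement is the Claim_ definition above) =====
theorem pv_fold_inv (l : List Int) :
    l.reverse.foldl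
      (fun (s : Int × Int) c =>
        (if c ≠ 0 then PySem.Int.floordiv (c * (c + 1)) 2 * s.2 + (c + 1) * s.1 else s.1,
         s.2 * 28)) ((0 : Int), (1 : Int))
      = (process l, (28 : Int) ^ l.length) := by
  induction l with
  | nil => simp [process]
  | cons c rest ih =>
    simp only [List.reverse_cons, List.foldl_append, ih, List.foldl_cons, List.foldl_nil,
      List.length_cons, process]
    by_cases hc : c = 0
    · simp [hc, pow_succ]
    · simp only [beq_iff_eq, hc, if_false, ne_eq, not_false_eq_true, if_true, pow_succ]
      have h56 : Int.fdiv 56 2 = 28 := by decide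
      norm_num [Prod.ext_iff, PySem.Int.floordiv, h56]

theorem process_spec : Claim_equal_process := by
  intro l _
  unfold Spec_process process_alt
  rw [pv_fold_inv]
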